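-- pv_equiv track=rewrite | github.com/pedeveaux/StringStuff | stringstuff.py | put_lowercase_first
-- ===== SOURCE A (Python) =====
-- def put_lowercase_first(input_str: str) -> str:
--     """
--     Exercise 4: Arrange string characters such that lowercase letters come first
--     """
--     prefix = ""
--     suffix = ""
--     for char in input_str:
--         if char.islower():
--             prefix += char
--         else:
--             suffix += char
--     return prefix + suffix
-- ===== SOURCE B (Python) =====
-- def put_lowercase_first(input_str: str) -> str:
--     return ''.join(sorted(input_str, key=lambda c: not c.islower()))
-- ===== Notes on version B (the rewrite author's own statement) =====
-- stated objective: idiomatic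
-- what changed: Replaces the two-accumulator character loop with a single stable sort keyed on whether the character is not lowercase, which partitions lowercase letters first while preserving relative order.
import Mathlib
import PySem

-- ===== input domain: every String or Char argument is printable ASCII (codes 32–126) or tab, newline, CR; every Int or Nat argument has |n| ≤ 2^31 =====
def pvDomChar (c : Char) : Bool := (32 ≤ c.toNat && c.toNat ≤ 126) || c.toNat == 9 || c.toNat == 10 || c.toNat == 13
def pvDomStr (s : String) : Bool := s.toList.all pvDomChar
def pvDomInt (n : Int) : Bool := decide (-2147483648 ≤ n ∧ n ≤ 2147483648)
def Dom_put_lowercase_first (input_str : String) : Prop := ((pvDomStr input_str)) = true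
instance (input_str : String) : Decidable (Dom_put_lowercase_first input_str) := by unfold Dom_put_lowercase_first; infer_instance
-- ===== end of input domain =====

-- B replaces A's two-accumulator scan with one stable sort by the boolean key "not islower" (idiomatic rewrite, same result).

-- ===== PORT A =====
-- literal port: one pass, two growing accumulators (prefix, suffix), then prefix + suffix
def put_lowercase_first (input_str : String) : String :=
  let r := input_str.toList.foldl
    (fun (acc : List Char × List Char) char =>
      if PySem.Chars.islower char then (acc.1 ++ [char], acc.2) else (acc.1, acc.2 ++ [char]))
    ([], [])
  String.ofList (r.1 ++ r.2)

-- ===== PORT B =====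
-- literal port of Source B: stable sort of the characters by the key (not islower); False (lowercase) sorts first
def put_lowercase_first_alt (input_str : String) : String :=
  String.ofList (PySem.List.sorted input_str.toList (fun c => !PySem.Chars.islower c) false)

-- ===== PRECONDITION & SPEC =====
def Spec_put_lowercase_first (input_str : String) (out : String) : Prop := out = put_lowercase_first_alt input_str
instance (input_str : String) (out : String) : Decidable (Spec_put_lowercase_first input_str out) := by unfold Spec_put_lowercase_first; infer_instance

-- ===== CLAIM (what is proved, stated in full; the proofs are below) =====
def Claim_equal_put_lowercase_first : Prop := ∀ (input_str : String), Dom_put_lowercase_first input_str → Spec_put_lowercase_first input_str (put_lowercase_first input_str)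

-- ===== LEMMAS AND PROOFS =====

-- inserting a false-key element into (all-false F) ++ (all-true T) puts it between the groups
theorem insertBy_bool_false {α : Type} (key : α → Bool) (x : α) (F T : List α)
    (hx : key x = false) (hF : ∀ y ∈ F, key y = false) (hT : ∀ y ∈ T, key y = true) :
    PySem.List.insertBy (fun a b => decide (key a < key b)) x (F ++ T) = F ++ x :: T := by
  induction F with
  | nil =>
    cases T with
    | nil => simp [PySem.List.insertBy]
    | cons t ts =>
      have ht := hT t (by simp)
      simp [PySem.List.insertBy, hx, ht]
  | cons f fs ih =>
    have hf := hF f (by simp)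
    simp only [List.cons_append, PySem.List.insertBy, hx, hf]
    simp [ih (fun y hy => hF y (by simp [hy]))]

-- inserting a true-key element appends it at the end
theorem insertBy_bool_true {α : Type} (key : α → Bool) (x : α) (L : List α)
    (hx : key x = true) :
    PySem.List.insertBy (fun a b => decide (key a < key b)) x L = L ++ [x] := by
  induction L with
  | nil => simp [PySem.List.insertBy]
  | cons y ys ih => simp [PySem.List.insertBy, hx, ih]

-- the insertion-sort loop over a partitioned accumulator keeps it partitioned and stable
theorem sort_loop_partition {α : Type} (key : α → Bool) (xs F T : List α)
    (hF : ∀ y ∈ F, key y = false) (hT : ∀ y ∈ T, key y = true) :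
    xs.foldl (fun acc x => PySem.List.insertBy (fun a b => decide (key a < key b)) x acc) (F ++ T)
      = (F ++ xs.filter (fun x => !key x)) ++ (T ++ xs.filter key) := by
  induction xs generalizing F T with
  | nil => simp
  | cons x xs ih =>
    by_cases hx : key x = true
    · rw [List.foldl_cons, insertBy_bool_true key x (F ++ T) hx,
        List.append_assoc F T [x], ih F (T ++ [x]) hF
          (by intro y hy; rcases List.mem_append.mp hy with h | h
              · exact hT y h
              · simp at h; simpa [h] using hx)]
      simp [hx]
    · have hx' : key x = false := by simpa using hx
      rw [List.foldl_cons, insertBy_bool_false key x F T hx' hF hT,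
        show F ++ x :: T = (F ++ [x]) ++ T by simp,
        ih (F ++ [x]) T
          (by intro y hy; rcases List.mem_append.mp hy with h | h
              · exact hF y h
              · simp at h; simpa [h] using hx')
          hT]
      simp [hx']

-- sorting by a boolean key is the stable partition: false-key elements first
theorem sorted_bool_key {α : Type} (key : α → Bool) (xs : List α) :
    PySem.List.sorted xs key false = xs.filter (fun x => !key x) ++ xs.filter key := by
  have h := sort_loop_partition key xs [] [] (by simp) (by simp)
  simpa [PySem.List.sorted] using h

-- A's accumulator loop computes the same two filters
theorem loopA (xs : List Char) (p s : List Char) :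
    xs.foldl (fun (acc : List Char × List Char) char =>
        if PySem.Chars.islower char then (acc.1 ++ [char], acc.2) else (acc.1, acc.2 ++ [char]))
      (p, s)
      = (p ++ xs.filter PySem.Chars.islower, s ++ xs.filter (fun c => !PySem.Chars.islower c)) := by
  induction xs generalizing p s with
  | nil => simp
  | cons c cs ih =>
    by_cases hc : PySem.Chars.islower c = true
    · simp [hc, ih]
    · have hc' : PySem.Chars.islower c = false := by simpa using hc
      simp [hc', ih]

-- ===== VERDICT (by name: the statement is the Claim_ definition above) =====
theorem put_lowercase_first_spec : Claim_equal_put_lowercase_first := by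
  intro input_str _
  unfold Spec_put_lowercase_first put_lowercase_first put_lowercase_first_alt
  rw [loopA, sorted_bool_key]
  simp
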